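-- pv_equiv track=rewrite | github.com/Uthaeus/codewars_python | 7kyu/quicksum.py | quicksum
-- ===== SOURCE A (Python) =====
-- def quicksum(packet):
--     p = list(packet)
--     alph = ' ABCDEFGHIJKLMNOPQRSTUVWXYZ'
--     check = 0
--
--     for index, val in enumerate(p, start=1):
--         if val not in alph:
--             return 0
--         check += (alph.find(val) * index)
--
--     return check
-- ===== SOURCE B (Python) =====
-- def quicksum(packet):
--     alph = ' ABCDEFGHIJKLMNOPQRSTUVWXYZ'
--     # Group first: total positional weight carried by each distinct character.
--     weights = {}
--     for i, c in enumerate(packet, 1):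
--         weights[c] = weights.get(c, 0) + i
--     # Then one pass over the (few) distinct characters.
--     total = 0
--     for c, w in weights.items():
--         v = alph.find(c)
--         if v == -1:
--             return 0
--         total += v * w
--     return total
-- ===== Notes on version B (the rewrite author's own statement) =====
-- stated objective: alternative
-- what changed: Replaces A's single enumerate loop (early return on the first invalid character, running checksum) with a group-by-character algorithm: a dict accumulates the total positional weight of each distinct character, then one pass over the few distinct characters validates them and multiplies each alphabet value by its aggregated weight.
import Mathlib
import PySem

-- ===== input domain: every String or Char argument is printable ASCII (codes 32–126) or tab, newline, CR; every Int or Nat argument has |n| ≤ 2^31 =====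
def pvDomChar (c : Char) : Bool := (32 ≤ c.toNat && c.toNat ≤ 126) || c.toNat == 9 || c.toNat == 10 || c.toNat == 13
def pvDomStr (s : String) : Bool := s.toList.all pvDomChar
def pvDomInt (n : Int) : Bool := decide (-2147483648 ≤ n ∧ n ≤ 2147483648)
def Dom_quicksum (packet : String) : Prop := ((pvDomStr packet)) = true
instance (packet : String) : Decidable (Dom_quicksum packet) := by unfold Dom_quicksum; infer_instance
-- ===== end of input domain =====

-- B replaces A's guard-and-accumulate enumerate loop by a group-by-character algorithm
-- (dict of per-character positional weights, then one validating pass over the distinct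
-- characters); objective: alternative decomposition, same exact result.

-- ===== PORT A =====
def qsAlph : List Char := " ABCDEFGHIJKLMNOPQRSTUVWXYZ".toList

-- A's loop: early return 0 on an invalid character, else accumulate find(val)*index.
def quicksumLoop : List (Int × Char) → Int → Int
  | [], check => check
  | (idx, v) :: rest, check =>
    if PySem.Chars.isIn [v] qsAlph then
      quicksumLoop rest (check + PySem.Chars.find qsAlph [v] * idx)
    else 0

def quicksum (packet : String) : Int :=
  quicksumLoop (PySem.List.enumerate packet.toList 1) 0

-- ===== PORT B =====
-- first loop of Source B: weights[c] = weights.get(c, 0) + i over enumerate(packet, 1)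
def qsWeights (l : List (Int × Char)) : PySem.Dict Char Int :=
  l.foldl (fun d p => d.insert p.2 (d.getD p.2 0 + p.1)) PySem.Dict.empty

-- second loop of Source B: over weights.items(), early return 0 on find(c) == -1
def qsSumLoop : List (Char × Int) → Int → Int
  | [], total => total
  | (c, w) :: rest, total =>
    let v := PySem.Chars.find qsAlph [c]
    if v = -1 then 0 else qsSumLoop rest (total + v * w)

def quicksum_alt (packet : String) : Int :=
  qsSumLoop (qsWeights (PySem.List.enumerate packet.toList 1)).items 0

-- ===== PRECONDITION & SPEC =====
def Spec_quicksum (packet : String) (out : Int) : Prop := out = quicksum_alt packet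
instance (packet : String) (out : Int) : Decidable (Spec_quicksum packet out) := by unfold Spec_quicksum; infer_instance

-- ===== CLAIM (what is proved, stated in full; the proofs are below) =====
def Claim_equal_quicksum : Prop := ∀ (packet : String), Dom_quicksum packet → Spec_quicksum packet (quicksum packet)

-- ===== LEMMAS AND PROOFS =====

-- A's loop equals: if every character is in the alphabet, the direct weighted sum, else 0.
lemma quicksumLoop_eq (l : List Char) : ∀ (s check : Int),
    quicksumLoop (PySem.List.enumerate l s) check =
      if l.all (fun c => PySem.Chars.isIn [c] qsAlph) then
        check + ((PySem.List.enumerate l s).map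
          (fun p => PySem.Chars.find qsAlph [p.2] * p.1)).sum
      else 0 := by
  induction l with
  | nil => intro s check; simp [quicksumLoop, PySem.List.enumerate_nil]
  | cons c rest ih =>
    intro s check
    rw [PySem.List.enumerate_cons]
    by_cases hc : PySem.Chars.isIn [c] qsAlph
    · simp [quicksumLoop, hc, ih (s + 1), List.all_cons]
      split_ifs
      · ring
      · rfl
    · simp [quicksumLoop, hc, List.all_cons]

-- a character with find = -1 is one that is not in the alphabet (single-char needle)
lemma find_eq_neg_one_iff_not_isIn (c : Char) :
    PySem.Chars.find qsAlph [c] = -1 ↔ ¬ PySem.Chars.isIn [c] qsAlph := by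
  rw [PySem.Chars.find_eq_neg_one_iff, ← PySem.Chars.isIn_eq_false_iff]
  simp

-- B's second loop equals: if every key is valid, total + the sum over items, else 0.
lemma qsSumLoop_eq (items : List (Char × Int)) : ∀ (total : Int),
    qsSumLoop items total =
      if items.all (fun p => PySem.Chars.isIn [p.1] qsAlph) then
        total + (items.map (fun p => PySem.Chars.find qsAlph [p.1] * p.2)).sum
      else 0 := by
  induction items with
  | nil => intro total; simp [qsSumLoop]
  | cons p rest ih =>
    obtain ⟨c, w⟩ := p
    intro total
    by_cases hc : PySem.Chars.isIn [c] qsAlph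
    · have hne : ¬ PySem.Chars.find qsAlph [c] = -1 := by
        rw [find_eq_neg_one_iff_not_isIn]; exact not_not_intro hc
      have h1 : qsSumLoop ((c, w) :: rest) total =
          qsSumLoop rest (total + PySem.Chars.find qsAlph [c] * w) := by
        simp [qsSumLoop, hne]
      rw [h1, ih, List.all_cons, hc]
      simp only [Bool.true_and, List.map_cons, List.sum_cons]
      split_ifs
      · ring
      · rfl
    · have he : PySem.Chars.find qsAlph [c] = -1 :=
        (find_eq_neg_one_iff_not_isIn c).2 hc
      simp [qsSumLoop, he, hc, List.all_cons]

-- the weight stored under key c is the sum of the indices at which c occurs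
lemma getD_qsWeights_aux (l : List (Int × Char)) :
    ∀ (d : PySem.Dict Char Int) (c : Char),
      (l.foldl (fun d p => d.insert p.2 (d.getD p.2 0 + p.1)) d).getD c 0 =
        d.getD c 0 + ((l.filter (fun p => p.2 = c)).map (·.1)).sum := by
  induction l with
  | nil => intro d c; simp
  | cons p rest ih =>
    intro d c
    simp only [List.foldl_cons, ih, List.filter_cons]
    by_cases hc : p.2 = c
    · subst hc
      simp
      ring
    · have hc' : ¬ c = p.2 := fun h => hc h.symm
      simp [PySem.Dict.getD_insert, hc', hc]

lemma getD_qsWeights (l : List (Int × Char)) (c : Char) :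
    (qsWeights l).getD c 0 = ((l.filter (fun p => p.2 = c)).map (·.1)).sum := by
  simp [qsWeights, getD_qsWeights_aux]

lemma keys_qsWeights (l : List (Int × Char)) :
    (qsWeights l).keys = PySem.Set.ofList (l.map (·.2)) := by
  simp [qsWeights, PySem.Dict.keys_foldl_insert_key, PySem.Dict.keys_empty,
    PySem.Set.update_nil_left]

lemma nodup_keys_qsWeights (l : List (Int × Char)) : (qsWeights l).keys.Nodup := by
  rw [keys_qsWeights]; exact PySem.Set.nodup_ofList _

-- summing an indicator over a list avoiding c gives 0
lemma sum_map_indicator_zero (K : List Char) (c : Char) (a : Int) (hc : c ∉ K) :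
    (K.map (fun k => if k = c then a else 0)).sum = 0 := by
  apply List.sum_eq_zero
  intro y hy
  obtain ⟨x, hx, rfl⟩ := List.mem_map.1 hy
  have : x ≠ c := fun he => hc (he ▸ hx)
  simp [this]

-- summing an indicator over a nodup list containing c picks out a
lemma sum_map_indicator (K : List Char) (c : Char) (a : Int) (hnd : K.Nodup) (hc : c ∈ K) :
    (K.map (fun k => if k = c then a else 0)).sum = a := by
  induction K with
  | nil => cases hc
  | cons x K ih =>
    rw [List.map_cons, List.sum_cons]
    rcases List.mem_cons.1 hc with h | h
    · subst h
      rw [if_pos rfl, sum_map_indicator_zero K c a (List.nodup_cons.1 hnd).1, add_zero]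
    · have hx : x ≠ c := fun he => (List.nodup_cons.1 hnd).1 (he ▸ h)
      rw [if_neg hx, ih (List.nodup_cons.1 hnd).2 h, zero_add]

-- grouping: the sum over distinct keys of value * aggregated weight equals the direct sum
lemma grouped_sum (K : List Char) (hnd : K.Nodup) :
    ∀ (l : List (Int × Char)), (∀ p ∈ l, p.2 ∈ K) →
      (K.map (fun k =>
        PySem.Chars.find qsAlph [k] *
          ((l.filter (fun p => p.2 = k)).map (·.1)).sum)).sum =
      (l.map (fun p => PySem.Chars.find qsAlph [p.2] * p.1)).sum := by
  intro l
  induction l with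
  | nil =>
    intro _
    simp
  | cons p rest ih =>
    intro hmem
    have hrest := ih (fun q hq => hmem q (List.mem_cons_of_mem _ hq))
    have hp : p.2 ∈ K := hmem p List.mem_cons_self
    calc (K.map (fun k =>
            PySem.Chars.find qsAlph [k] *
              (((p :: rest).filter (fun q => q.2 = k)).map (·.1)).sum)).sum
        = (K.map (fun k =>
            PySem.Chars.find qsAlph [k] *
              ((rest.filter (fun q => q.2 = k)).map (·.1)).sum
            + (if k = p.2 then PySem.Chars.find qsAlph [p.2] * p.1 else 0))).sum := by
          apply congrArg
          apply List.map_congr_left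
          intro k _
          by_cases hk : p.2 = k
          · simp [hk]
            ring
          · have : k ≠ p.2 := fun he => hk he.symm
            simp [hk, this]
      _ = (K.map (fun k =>
            PySem.Chars.find qsAlph [k] *
              ((rest.filter (fun q => q.2 = k)).map (·.1)).sum)).sum
            + (K.map (fun k => if k = p.2 then PySem.Chars.find qsAlph [p.2] * p.1 else 0)).sum := by
          rw [← List.sum_map_add]
      _ = (rest.map (fun q => PySem.Chars.find qsAlph [q.2] * q.1)).sum
            + PySem.Chars.find qsAlph [p.2] * p.1 := by
          rw [hrest, sum_map_indicator K p.2 _ hnd hp]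
      _ = ((p :: rest).map (fun q => PySem.Chars.find qsAlph [q.2] * q.1)).sum := by
          simp [List.map_cons]; ring

-- ===== VERDICT (by name: the statement is the Claim_ definition above) =====
theorem quicksum_spec : Claim_equal_quicksum := by
  intro packet _
  unfold Spec_quicksum quicksum quicksum_alt
  set l := packet.toList with hl
  set L := PySem.List.enumerate l 1 with hL
  have hsnd : L.map (·.2) = l := PySem.List.map_snd_enumerate l 1
  have hkeys : (qsWeights L).keys = PySem.Set.ofList l := by
    rw [keys_qsWeights, hsnd]
  have hitems : (qsWeights L).items =
      (qsWeights L).keys.map (fun k => (k, (qsWeights L).getD k 0)) :=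
    PySem.Dict.items_eq_map_keys _ (nodup_keys_qsWeights L) 0
  rw [quicksumLoop_eq, qsSumLoop_eq, hitems, hkeys]
  -- the two validity tests agree
  have hvalid : ((PySem.Set.ofList l).map (fun k => (k, (qsWeights L).getD k 0))).all
        (fun p => PySem.Chars.isIn [p.1] qsAlph)
      = l.all (fun c => PySem.Chars.isIn [c] qsAlph) := by
    simp only [List.all_map]
    rw [Bool.eq_iff_iff]
    simp only [List.all_eq_true]
    constructor
    · intro h c hc
      exact h c ((PySem.Set.mem_ofList l c).2 hc)
    · intro h c hc
      exact h c ((PySem.Set.mem_ofList l c).1 hc)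
  rw [hvalid]
  by_cases hv : l.all (fun c => PySem.Chars.isIn [c] qsAlph)
  · simp only [hv, if_pos, zero_add]
    have := grouped_sum (PySem.Set.ofList l) (PySem.Set.nodup_ofList l) L
      (fun p hp => (PySem.Set.mem_ofList l p.2).2 (by
        rw [← hsnd]; exact List.mem_map.2 ⟨p, hp, rfl⟩))
    rw [← this]
    apply congrArg
    simp only [List.map_map]
    apply List.map_congr_left
    intro k _
    simp [getD_qsWeights]
  · simp [hv]
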